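-- pv_equiv track=rewrite | github.com/adnan-bin-wahid/5th_Semester | DBMS/Code/Recovery_management3.py | analyze_log
-- ===== SOURCE A (Python) =====
-- def analyze_log(log):
--     committed = set()  # Committed transactions
--     active_transactions = set()  # Active but not committed transactions
--     redo_transactions = set()  # Transactions that need to be redone
--     undo_transactions = set()  # Transactions that need to be undone
--     elements = {}  # Dictionary to hold element updates for all transactions
--     checkpoint_found = False
--     last_checkpoint_index = -1
--
--     # Step 1: Process log entries
--     for i, entry in enumerate(log):
--         if entry.startswith('<START'):
--             transaction = entry.split(' ')[1].strip('>')
--             active_transactions.add(transaction)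
--
--         elif entry.startswith('<COMMIT'):
--             transaction = entry.split(' ')[1].strip('>')
--             committed.add(transaction)
--             if transaction in active_transactions:
--                 active_transactions.remove(transaction)
--
--         elif entry.startswith('<CKPT'):
--             # Checkpoint found, mark its position
--             checkpoint_found = True
--             last_checkpoint_index = i
--             # Extract transactions in checkpoint
--             checkpoint_transactions = set(entry[entry.index('(')+1:entry.index(')')].split(','))
--
--         elif '<T' in entry and '>' in entry:
--             parts = entry.strip('<>').split(' ')
--             transaction, element, old_value, new_value = parts[0], parts[1], parts[2], parts[3]
--             # Record the updates for each transaction in the elements dictionary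
--             if transaction not in elements:
--                 elements[transaction] = []
--             elements[transaction].append((element, old_value, new_value))
--
--     # Step 2: Identify redo and undo transactions
--     if checkpoint_found:
--         # After the checkpoint, we redo only committed transactions that are committed after the checkpoint
--         for i in range(last_checkpoint_index + 1, len(log)):
--             entry = log[i]
--             if entry.startswith('<COMMIT'):
--                 transaction = entry.split(' ')[1].strip('>')
--                 redo_transactions.add(transaction)
--
--         # Undo all transactions that are still active and not committed
--         undo_transactions = active_transactions - committed
--     else:
--         # If no checkpoint, redo all committed transactions and undo all active transactions
--         redo_transactions = committed
--         undo_transactions = active_transactions - committed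
--
--     return redo_transactions, undo_transactions, elements
-- ===== SOURCE B (Python) =====
-- def _parse(entry):
--     """Classify one log entry; malformed entries are classified as irrelevant."""
--     if entry.startswith('<START'):
--         parts = entry.split(' ')
--         if len(parts) >= 2:
--             return ('start', parts[1].strip('>'))
--         return ('other',)
--     if entry.startswith('<COMMIT'):
--         parts = entry.split(' ')
--         if len(parts) >= 2:
--             return ('commit', parts[1].strip('>'))
--         return ('other',)
--     if entry.startswith('<CKPT'):
--         return ('ckpt',)
--     if '<T' in entry and '>' in entry:
--         parts = entry.strip('<>').split(' ')
--         if len(parts) >= 4: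
--             return ('update', parts[0], parts[1], parts[2], parts[3])
--         return ('other',)
--     return ('other',)
--
--
-- def analyze_log(log):
--     # Single pass: parse each entry into an event, dispatch on it; the redo set
--     # is maintained incrementally (cleared at each checkpoint), so no second scan.
--     redo = set()
--     committed = set()
--     active = set()
--     elements = {}
--     for entry in log:
--         ev = _parse(entry)
--         tag = ev[0]
--         if tag == 'start':
--             active.add(ev[1])
--         elif tag == 'commit':
--             t = ev[1]
--             committed.add(t)
--             active.discard(t)
--             redo.add(t)
--         elif tag == 'ckpt':
--             redo = set()
--         elif tag == 'update':
--             elements.setdefault(ev[1], []).append((ev[2], ev[3], ev[4]))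
--     return redo, active - committed, elements
-- ===== Notes on version B (the rewrite author's own statement) =====
-- stated objective: simpler
-- what changed: B replaces A's two passes (full scan plus a re-scan of the log after the last checkpoint) by a single parse-then-dispatch pass that maintains the redo set incrementally, clearing it at each checkpoint, and drops the checkpoint bookkeeping (checkpoint_found, last_checkpoint_index, the unused checkpoint transaction set) entirely.
import Mathlib
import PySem

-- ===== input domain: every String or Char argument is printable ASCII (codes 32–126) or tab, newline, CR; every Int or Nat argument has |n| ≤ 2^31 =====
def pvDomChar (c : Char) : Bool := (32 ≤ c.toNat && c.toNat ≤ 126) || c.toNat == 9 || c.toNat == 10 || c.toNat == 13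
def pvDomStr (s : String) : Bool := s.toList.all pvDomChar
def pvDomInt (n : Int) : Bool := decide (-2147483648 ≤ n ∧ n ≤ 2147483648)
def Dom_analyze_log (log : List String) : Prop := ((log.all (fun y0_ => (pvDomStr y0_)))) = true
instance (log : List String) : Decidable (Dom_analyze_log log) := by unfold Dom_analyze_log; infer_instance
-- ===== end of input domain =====

-- B replaces A's two passes (scan + re-scan after the last checkpoint) by a single
-- parse-then-dispatch pass that maintains the redo set incrementally (objective: simpler).

-- ===== PORT A =====

-- entry.split(' ')  (sep " " ≠ "", so split? is some; the getD default is unreachable)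
def pvSplitSp (e : String) : List String := (PySem.Str.split? e " ").getD []

-- entry.split(' ')[1].strip('>')  (the [1] raises IndexError when missing: excluded by Pre_;
-- pyGetD's default is only reached outside Pre_)
def pvTx (e : String) : String := PySem.Str.stripChars (PySem.List.pyGetD (pvSplitSp e) 1 "") ">"

structure AState where
  committed : PySem.Set String
  active : PySem.Set String
  elements : PySem.Dict String (List (String × String × String))
  ckptFound : Bool
  lastIdx : Int

def aStep (s : AState) (p : Int × String) : AState :=
  let entry := p.2
  if PySem.Str.startswith entry "<START" then
    { s with active := s.active.add (pvTx entry) }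
  else if PySem.Str.startswith entry "<COMMIT" then
    let t := pvTx entry
    { s with committed := s.committed.add t,
             active := if s.active.contains t then (s.active.remove? t).getD s.active else s.active }
  else if PySem.Str.startswith entry "<CKPT" then
    -- checkpoint_transactions: computed (it raises ValueError when '(' or ')' is missing —
    -- excluded by Pre_; Str.find's -1 stands in for the raise) but never used afterwards
    let _cps := PySem.Set.ofList ((PySem.Str.split? (PySem.Str.slice entry
        (some (PySem.Str.find entry "(" + 1)) (some (PySem.Str.find entry ")"))) ",").getD [])
    { s with ckptFound := true, lastIdx := p.1 }
  else if PySem.Str.isIn "<T" entry && PySem.Str.isIn ">" entry then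
    let parts := (PySem.Str.split? (PySem.Str.stripChars entry "<>") " ").getD []
    let t := PySem.List.pyGetD parts 0 ""
    let el := PySem.List.pyGetD parts 1 ""
    let ov := PySem.List.pyGetD parts 2 ""
    let nv := PySem.List.pyGetD parts 3 ""
    let d := if s.elements.contains t then s.elements else s.elements.insert t []
    { s with elements := d.modify t [] (· ++ [(el, ov, nv)]) }
  else s

def analyze_log (log : List String) : List String × List String × (List (String × List (String × String × String))) :=
  let s := (PySem.List.enumerate log).foldl aStep ⟨PySem.Set.empty, PySem.Set.empty, PySem.Dict.empty, false, -1⟩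
  let redo := if s.ckptFound then
      -- for i in range(last_checkpoint_index + 1, len(log)): entry = log[i]; …
      (PySem.List.pyRange (s.lastIdx + 1) (PySem.List.len log)).foldl
        (fun r i =>
          let entry := PySem.List.pyGetD log i ""
          if PySem.Str.startswith entry "<COMMIT" then r.add (pvTx entry) else r)
        PySem.Set.empty
    else s.committed
  (redo, s.active.diff s.committed, s.elements.items)

-- ===== PORT B =====

inductive PvEv where
  | start (t : String)
  | commit (t : String)
  | ckpt
  | update (t el ov nv : String)
  | other

def pvParse (entry : String) : PvEv :=
  if PySem.Str.startswith entry "<START" then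
    let parts := (PySem.Str.split? entry " ").getD []
    if 2 ≤ parts.length then .start (PySem.Str.stripChars (PySem.List.pyGetD parts 1 "") ">") else .other
  else if PySem.Str.startswith entry "<COMMIT" then
    let parts := (PySem.Str.split? entry " ").getD []
    if 2 ≤ parts.length then .commit (PySem.Str.stripChars (PySem.List.pyGetD parts 1 "") ">") else .other
  else if PySem.Str.startswith entry "<CKPT" then .ckpt
  else if PySem.Str.isIn "<T" entry && PySem.Str.isIn ">" entry then
    let parts := (PySem.Str.split? (PySem.Str.stripChars entry "<>") " ").getD []
    if 4 ≤ parts.length then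
      .update (PySem.List.pyGetD parts 0 "") (PySem.List.pyGetD parts 1 "")
              (PySem.List.pyGetD parts 2 "") (PySem.List.pyGetD parts 3 "")
    else .other
  else .other

structure BState where
  redo : PySem.Set String
  committed : PySem.Set String
  active : PySem.Set String
  elements : PySem.Dict String (List (String × String × String))

def bStep (s : BState) (entry : String) : BState :=
  match pvParse entry with
  | .start t => { s with active := s.active.add t }
  | .commit t => { s with committed := s.committed.add t,
                          active := s.active.discard t,
                          redo := s.redo.add t }
  | .ckpt => { s with redo := PySem.Set.empty }
  | .update t el ov nv =>
      { s with elements := (s.elements.setdefault t []).modify t [] (· ++ [(el, ov, nv)]) }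
  | .other => s

def analyze_log_alt (log : List String) : List String × List String × (List (String × List (String × String × String))) :=
  let s := log.foldl bStep ⟨PySem.Set.empty, PySem.Set.empty, PySem.Set.empty, PySem.Dict.empty⟩
  (s.redo, s.active.diff s.committed, s.elements.items)

-- ===== PRECONDITION & SPEC =====

-- Pre_ excludes exactly the inputs on which A raises: a '<START'/'<COMMIT' entry with no
-- space (IndexError), a '<CKPT' entry missing '(' or ')' (ValueError), or an update entry
-- whose stripped body has fewer than four space-separated fields (IndexError).
def pvPreEntry (e : String) : Bool :=
  if PySem.Str.startswith e "<START" then decide (2 ≤ ((PySem.Str.split? e " ").getD []).length)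
  else if PySem.Str.startswith e "<COMMIT" then decide (2 ≤ ((PySem.Str.split? e " ").getD []).length)
  else if PySem.Str.startswith e "<CKPT" then PySem.Str.isIn "(" e && PySem.Str.isIn ")" e
  else if PySem.Str.isIn "<T" e && PySem.Str.isIn ">" e then
    decide (4 ≤ ((PySem.Str.split? (PySem.Str.stripChars e "<>") " ").getD []).length)
  else true

def Pre_analyze_log (log : List String) : Prop := (log.all pvPreEntry) = true
instance (log : List String) : Decidable (Pre_analyze_log log) := by unfold Pre_analyze_log; infer_instance

def pvWitness_analyze_log : List String :=
  ["<START T1>", "<T1 A 10 20>", "<CKPT (T1)>", "<COMMIT T1>", "<START T2>"]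

def Spec_analyze_log (log : List String) (out : List String × List String × (List (String × List (String × String × String)))) : Prop := out = analyze_log_alt log
instance (log : List String) (out : List String × List String × (List (String × List (String × String × String)))) : Decidable (Spec_analyze_log log out) := by
  unfold Spec_analyze_log
  exact @instDecidableEqProd _ _ (by infer_instance)
    (@instDecidableEqProd _ _ (by infer_instance) (by infer_instance)) out (analyze_log_alt log)

-- ===== CLAIM (what is proved, stated in full; the proofs are below) =====
def Claim_equal_analyze_log : Prop := ∀ (log : List String), Dom_analyze_log log → Pre_analyze_log log → Spec_analyze_log log (analyze_log log)

-- ===== LEMMAS AND PROOFS =====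

-- one step of A's second scan (the body of its redo loop)
def pvCommitStep (r : PySem.Set String) (entry : String) : PySem.Set String :=
  if PySem.Str.startswith entry "<COMMIT" then r.add (pvTx entry) else r

-- coupling invariant between A's loop state and B's loop state after the same prefix
def pvInv (processed : List String) (sa : AState) (sb : BState) : Prop :=
  sa.committed = sb.committed ∧ sa.active = sb.active ∧ sa.elements = sb.elements ∧
  (sa.ckptFound = false → sb.redo = sb.committed) ∧
  (sa.ckptFound = true → ∃ j : Nat, sa.lastIdx = (j : Int) ∧ j < processed.length ∧
      sb.redo = (processed.drop (j + 1)).foldl pvCommitStep PySem.Set.empty)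

lemma pv_start_not_commit (e : String) (h : PySem.Str.startswith e "<START" = true) :
    PySem.Str.startswith e "<COMMIT" = false := by
  by_contra h'
  rw [Bool.not_eq_false] at h'
  simp only [PySem.Str.startswith_eq, PySem.Chars.startswith_iff] at h h'
  have := List.prefix_of_prefix_length_le h h' (by decide)
  revert this; decide

lemma pv_discard_of_not_contains (s : PySem.Set String) (t : String)
    (h : s.contains t = false) : s.discard t = s := by
  simp [PySem.Set.contains] at h
  simp [PySem.Set.discard]
  intro a ha heq
  exact h (heq ▸ ha)

-- the two redo clauses of pvInv survive a step that leaves redo/committed/ckptFound unchanged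
lemma pv_inv_redo_ext (processed : List String) (e : String) (redo committed : PySem.Set String)
    (ck : Bool) (li : Int)
    (hcm : PySem.Str.startswith e "<COMMIT" = false)
    (hnf : ck = false → redo = committed)
    (hf : ck = true → ∃ j : Nat, li = (j : Int) ∧ j < processed.length ∧
      redo = (processed.drop (j + 1)).foldl pvCommitStep PySem.Set.empty) :
    (ck = false → redo = committed) ∧
    (ck = true → ∃ j : Nat, li = (j : Int) ∧ j < (processed ++ [e]).length ∧
      redo = ((processed ++ [e]).drop (j + 1)).foldl pvCommitStep PySem.Set.empty) := by
  refine ⟨hnf, fun h => ?_⟩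
  obtain ⟨j, hj1, hj2, hj3⟩ := hf h
  refine ⟨j, hj1, by rw [List.length_append]; omega, ?_⟩
  rw [List.drop_append_of_le_length (by omega), List.foldl_append, hj3,
    List.foldl_cons, List.foldl_nil]
  unfold pvCommitStep
  rw [if_neg (by rw [hcm]; exact Bool.false_ne_true)]

-- A's guarded remove (if t in active: active.remove(t)) is B's discard
lemma pv_remove_eq_discard (s : PySem.Set String) (t : String) :
    (if s.contains t = true then (s.remove? t).getD s else s) = s.discard t := by
  by_cases h : s.contains t = true
  · have h' : t ∈ s := by simpa [PySem.Set.contains] using h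
    simp [PySem.Set.remove?, h']
  · rw [if_neg h, pv_discard_of_not_contains s t (by simpa using h)]

-- branch-reduction lemmas for the two step functions (conditions as in the Python if-chains)
lemma aStep_start (s : AState) (i : Int) (e : String)
    (c1 : PySem.Str.startswith e "<START" = true) :
    aStep s (i, e) = { s with active := s.active.add (pvTx e) } := by
  unfold aStep; rw [if_pos c1]

lemma bStep_start (s : BState) (e : String)
    (c1 : PySem.Str.startswith e "<START" = true)
    (hlen : 2 ≤ ((PySem.Str.split? e " ").getD []).length) :
    bStep s e = { s with active := s.active.add (pvTx e) } := by
  unfold bStep pvParse pvTx pvSplitSp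
  rw [if_pos c1, if_pos hlen]

lemma aStep_commit (s : AState) (i : Int) (e : String)
    (c1 : ¬ PySem.Str.startswith e "<START" = true)
    (c2 : PySem.Str.startswith e "<COMMIT" = true) :
    aStep s (i, e) = { s with
        committed := s.committed.add (pvTx e),
        active := (if s.active.contains (pvTx e) = true
                   then (s.active.remove? (pvTx e)).getD s.active else s.active) } := by
  unfold aStep; rw [if_neg c1, if_pos c2]

lemma bStep_commit (s : BState) (e : String)
    (c1 : ¬ PySem.Str.startswith e "<START" = true)
    (c2 : PySem.Str.startswith e "<COMMIT" = true)
    (hlen : 2 ≤ ((PySem.Str.split? e " ").getD []).length) :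
    bStep s e = { s with
        committed := s.committed.add (pvTx e),
        active := s.active.discard (pvTx e),
        redo := s.redo.add (pvTx e) } := by
  unfold bStep pvParse pvTx pvSplitSp
  rw [if_neg c1, if_pos c2, if_pos hlen]

lemma aStep_ckpt (s : AState) (i : Int) (e : String)
    (c1 : ¬ PySem.Str.startswith e "<START" = true)
    (c2 : ¬ PySem.Str.startswith e "<COMMIT" = true)
    (c3 : PySem.Str.startswith e "<CKPT" = true) :
    aStep s (i, e) = { s with ckptFound := true, lastIdx := i } := by
  unfold aStep; rw [if_neg c1, if_neg c2, if_pos c3]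

lemma bStep_ckpt (s : BState) (e : String)
    (c1 : ¬ PySem.Str.startswith e "<START" = true)
    (c2 : ¬ PySem.Str.startswith e "<COMMIT" = true)
    (c3 : PySem.Str.startswith e "<CKPT" = true) :
    bStep s e = { s with redo := PySem.Set.empty } := by
  unfold bStep pvParse
  rw [if_neg c1, if_neg c2, if_pos c3]

-- the fields of an update entry, as A computes them
def pvUParts (e : String) : List String := (PySem.Str.split? (PySem.Str.stripChars e "<>") " ").getD []

lemma aStep_update (s : AState) (i : Int) (e : String)
    (c1 : ¬ PySem.Str.startswith e "<START" = true)
    (c2 : ¬ PySem.Str.startswith e "<COMMIT" = true)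
    (c3 : ¬ PySem.Str.startswith e "<CKPT" = true)
    (c4 : (PySem.Str.isIn "<T" e && PySem.Str.isIn ">" e) = true) :
    aStep s (i, e) = { s with
        elements :=
      ((if s.elements.contains (PySem.List.pyGetD (pvUParts e) 0 "") = true
        then s.elements else s.elements.insert (PySem.List.pyGetD (pvUParts e) 0 "") []).modify
        (PySem.List.pyGetD (pvUParts e) 0 "") []
        (· ++ [(PySem.List.pyGetD (pvUParts e) 1 "", PySem.List.pyGetD (pvUParts e) 2 "",
                PySem.List.pyGetD (pvUParts e) 3 "")])) } := by
  unfold aStep pvUParts; rw [if_neg c1, if_neg c2, if_neg c3, if_pos c4]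

lemma bStep_update (s : BState) (e : String)
    (c1 : ¬ PySem.Str.startswith e "<START" = true)
    (c2 : ¬ PySem.Str.startswith e "<COMMIT" = true)
    (c3 : ¬ PySem.Str.startswith e "<CKPT" = true)
    (c4 : (PySem.Str.isIn "<T" e && PySem.Str.isIn ">" e) = true)
    (hlen : 4 ≤ (pvUParts e).length) :
    bStep s e = { s with
        elements :=
      ((s.elements.setdefault (PySem.List.pyGetD (pvUParts e) 0 "") []).modify
        (PySem.List.pyGetD (pvUParts e) 0 "") []
        (· ++ [(PySem.List.pyGetD (pvUParts e) 1 "", PySem.List.pyGetD (pvUParts e) 2 "",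
                PySem.List.pyGetD (pvUParts e) 3 "")])) } := by
  unfold bStep pvParse pvUParts
  rw [if_neg c1, if_neg c2, if_neg c3, if_pos c4, if_pos (by unfold pvUParts at hlen; exact hlen)]

lemma aStep_other (s : AState) (i : Int) (e : String)
    (c1 : ¬ PySem.Str.startswith e "<START" = true)
    (c2 : ¬ PySem.Str.startswith e "<COMMIT" = true)
    (c3 : ¬ PySem.Str.startswith e "<CKPT" = true)
    (c4 : ¬ (PySem.Str.isIn "<T" e && PySem.Str.isIn ">" e) = true) :
    aStep s (i, e) = s := by
  unfold aStep; rw [if_neg c1, if_neg c2, if_neg c3, if_neg c4]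

lemma bStep_other (s : BState) (e : String)
    (c1 : ¬ PySem.Str.startswith e "<START" = true)
    (c2 : ¬ PySem.Str.startswith e "<COMMIT" = true)
    (c3 : ¬ PySem.Str.startswith e "<CKPT" = true)
    (c4 : ¬ (PySem.Str.isIn "<T" e && PySem.Str.isIn ">" e) = true) :
    bStep s e = s := by
  unfold bStep pvParse
  rw [if_neg c1, if_neg c2, if_neg c3, if_neg c4]

lemma pv_step (processed : List String) (e : String) (sa : AState) (sb : BState)
    (hpre : pvPreEntry e = true) (hinv : pvInv processed sa sb) :
    pvInv (processed ++ [e]) (aStep sa ((processed.length : Int), e)) (bStep sb e) := by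
  obtain ⟨hc, ha, he, hnf, hf⟩ := hinv
  by_cases c1 : PySem.Str.startswith e "<START" = true
  · -- '<START' branch
    have hcm : PySem.Str.startswith e "<COMMIT" = false := pv_start_not_commit e c1
    have hlen : 2 ≤ ((PySem.Str.split? e " ").getD []).length := by
      unfold pvPreEntry at hpre; rw [if_pos c1] at hpre; simpa using hpre
    rw [aStep_start sa _ e c1, bStep_start sb e c1 hlen]
    exact ⟨hc, by rw [ha], he,
      (pv_inv_redo_ext processed e sb.redo sb.committed sa.ckptFound sa.lastIdx hcm hnf hf).1,
      (pv_inv_redo_ext processed e sb.redo sb.committed sa.ckptFound sa.lastIdx hcm hnf hf).2⟩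
  · by_cases c2 : PySem.Str.startswith e "<COMMIT" = true
    · -- '<COMMIT' branch
      have hlen : 2 ≤ ((PySem.Str.split? e " ").getD []).length := by
        unfold pvPreEntry at hpre; rw [if_neg c1, if_pos c2] at hpre; simpa using hpre
      rw [aStep_commit sa _ e c1 c2, bStep_commit sb e c1 c2 hlen]
      refine ⟨by rw [hc], by rw [ha, pv_remove_eq_discard], he, ?_, ?_⟩
      · intro h; dsimp only at h ⊢; rw [hnf h]
      · intro h; dsimp only at h ⊢
        obtain ⟨j, hj1, hj2, hj3⟩ := hf h
        refine ⟨j, hj1, by rw [List.length_append]; omega, ?_⟩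
        rw [List.drop_append_of_le_length (by omega), List.foldl_append, hj3,
          List.foldl_cons, List.foldl_nil]
        unfold pvCommitStep
        rw [if_pos c2]
    · by_cases c3 : PySem.Str.startswith e "<CKPT" = true
      · -- '<CKPT' branch
        rw [aStep_ckpt sa _ e c1 c2 c3, bStep_ckpt sb e c1 c2 c3]
        refine ⟨hc, ha, he, fun h => absurd h (by simp), fun _ => ⟨processed.length, rfl, by simp, ?_⟩⟩
        dsimp only
        rw [show processed.length + 1 = (processed ++ [e]).length by simp, List.drop_length]
        rfl
      · by_cases c4 : (PySem.Str.isIn "<T" e && PySem.Str.isIn ">" e) = true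
        · -- update branch
          have hlen : 4 ≤ (pvUParts e).length := by
            unfold pvPreEntry at hpre; rw [if_neg c1, if_neg c2, if_neg c3, if_pos c4] at hpre
            unfold pvUParts; simpa using hpre
          rw [aStep_update sa _ e c1 c2 c3 c4, bStep_update sb e c1 c2 c3 c4 hlen]
          refine ⟨hc, ha, ?_,
            (pv_inv_redo_ext processed e sb.redo sb.committed sa.ckptFound sa.lastIdx
              (by simpa using c2) hnf hf).1,
            (pv_inv_redo_ext processed e sb.redo sb.committed sa.ckptFound sa.lastIdx
              (by simpa using c2) hnf hf).2⟩
          dsimp only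
          rw [he]
          by_cases hct : sb.elements.contains (PySem.List.pyGetD (pvUParts e) 0 "") = true
          · rw [if_pos hct, PySem.Dict.setdefault_of_contains _ _ hct]
          · rw [if_neg hct,
              PySem.Dict.setdefault_of_not_contains _ _ (by simpa using hct)]
        · -- irrelevant entry: both states unchanged
          rw [aStep_other sa _ e c1 c2 c3 c4, bStep_other sb e c1 c2 c3 c4]
          exact ⟨hc, ha, he,
            (pv_inv_redo_ext processed e sb.redo sb.committed sa.ckptFound sa.lastIdx
              (by simpa using c2) hnf hf).1,
            (pv_inv_redo_ext processed e sb.redo sb.committed sa.ckptFound sa.lastIdx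
              (by simpa using c2) hnf hf).2⟩

lemma pv_main (rest : List String) : ∀ (processed : List String) (sa : AState) (sb : BState),
    (∀ e ∈ rest, pvPreEntry e = true) → pvInv processed sa sb →
    pvInv (processed ++ rest)
      ((PySem.List.enumerate rest (processed.length : Int)).foldl aStep sa)
      (rest.foldl bStep sb) := by
  induction rest with
  | nil => intro processed sa sb _ hinv; simpa using hinv
  | cons e rest ih =>
    intro processed sa sb hpre hinv
    have h1 : PySem.List.enumerate (e :: rest) (processed.length : Int)
        = ((processed.length : Int), e) :: PySem.List.enumerate rest ((processed.length : Int) + 1) := rfl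
    rw [h1, List.foldl_cons, List.foldl_cons]
    have h2 : ((processed.length : Int) + 1) = ((processed ++ [e]).length : Int) := by
      simp
    rw [h2]
    have := ih (processed ++ [e]) (aStep sa ((processed.length : Int), e)) (bStep sb e)
      (fun x hx => hpre x (List.mem_cons_of_mem _ hx))
      (pv_step processed e sa sb (hpre e (List.mem_cons_self)) hinv)
    simpa using this

-- ===== VERDICT (by name: the statement is the Claim_ definition above) =====
theorem analyze_log_spec : Claim_equal_analyze_log := by
  intro log _ hpre
  unfold Spec_analyze_log
  have hinv0 : pvInv [] ⟨PySem.Set.empty, PySem.Set.empty, PySem.Dict.empty, false, -1⟩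
      ⟨PySem.Set.empty, PySem.Set.empty, PySem.Set.empty, PySem.Dict.empty⟩ :=
    ⟨rfl, rfl, rfl, fun _ => rfl, fun h => absurd h (by decide)⟩
  have hmain := pv_main log [] ⟨PySem.Set.empty, PySem.Set.empty, PySem.Dict.empty, false, -1⟩
      ⟨PySem.Set.empty, PySem.Set.empty, PySem.Set.empty, PySem.Dict.empty⟩
      (fun e he => by
        have h2 := hpre; unfold Pre_analyze_log at h2
        simp only [List.all_eq_true] at h2
        exact h2 e he) hinv0
  rw [List.nil_append] at hmain
  simp only [List.length_nil, Nat.cast_zero] at hmain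
  obtain ⟨hc, ha, he, hnf, hf⟩ := hmain
  simp only [analyze_log, analyze_log_alt, Prod.mk.injEq]
  refine ⟨?_, ?_, ?_⟩
  · -- redo component
    by_cases hck : ((PySem.List.enumerate log).foldl aStep
        ⟨PySem.Set.empty, PySem.Set.empty, PySem.Dict.empty, false, -1⟩).ckptFound = true
    · obtain ⟨j, hj1, hj2, hj3⟩ := hf hck
      rw [if_pos hck, hj1]
      have hfun : (fun (r : PySem.Set String) (i : Int) =>
          if PySem.Str.startswith (PySem.List.pyGetD log i "") "<COMMIT" = true
          then r.add (pvTx (PySem.List.pyGetD log i "")) else r)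
          = (fun acc j => pvCommitStep acc (PySem.List.pyGetD log j "")) := rfl
      rw [hfun, PySem.List.foldl_pyRange_pyGetD log "" pvCommitStep PySem.Set.empty
        (by omega : (0:Int) ≤ (j : Int) + 1)]
      rw [show ((j : Int) + 1).toNat = j + 1 by omega, ← hj3]
    · rw [if_neg hck, hc, hnf (by simpa using hck)]
  · rw [ha, hc]
  · rw [he]
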